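-- pv_equiv track=rewrite | github.com/prominatedk/odoo_sh_prominatedk | oh_bankintegration/models/account_bank_statement_line.py | get_invoice_number
-- ===== SOURCE A (Python) =====
-- def get_invoice_number(invoice_text):
--     invoice_text_list = invoice_text.split(',')
--     invoice_str = []
--     if invoice_text_list:
--         for invoice_text_item in invoice_text_list:
--             invoice_text_item = invoice_text_item.replace('.', ' ')
--             invoice_list = invoice_text_item.strip(' ').split(' ')
--             if invoice_list:
--                 for invoice_item in invoice_list:
--                     #invoice_item = re.sub("[^0-9]", "", invoice_item)
--                     invoice_item = invoice_item.lstrip('0')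
--                     if invoice_item:
--                         invoice_str.append(invoice_item)
--                         if len(invoice_item) > 2:
--                             # Remove last char if it is FIK Payment
--                             invoice_item = invoice_item[:-1]
--                             invoice_str.append(invoice_item)
--     return invoice_str
-- ===== SOURCE B (Python) =====
-- def get_invoice_number(invoice_text):
--     # Single left-to-right character scan over the unified delimiter set (comma, period, space)
--     result = []
--     token = []
--     for ch in invoice_text + ',':
--         if ch in ',. ':
--             t = ''.join(token).lstrip('0')
--             token = []
--             if t:
--                 result.append(t)
--                 if len(t) > 2:
--                     result.append(t[:-1])
--         else:
--             token.append(ch)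
--     return result
-- ===== Notes on version B (the rewrite author's own statement) =====
-- stated objective: alternative
-- what changed: Replaces A's nested split pipeline (split on commas, replace periods with spaces, strip, split on spaces, per-token emit) by a single character-level scan that accumulates tokens between any delimiter (comma, period or space) and emits each token, and its last-char-dropped variant, on the fly.
import Mathlib
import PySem

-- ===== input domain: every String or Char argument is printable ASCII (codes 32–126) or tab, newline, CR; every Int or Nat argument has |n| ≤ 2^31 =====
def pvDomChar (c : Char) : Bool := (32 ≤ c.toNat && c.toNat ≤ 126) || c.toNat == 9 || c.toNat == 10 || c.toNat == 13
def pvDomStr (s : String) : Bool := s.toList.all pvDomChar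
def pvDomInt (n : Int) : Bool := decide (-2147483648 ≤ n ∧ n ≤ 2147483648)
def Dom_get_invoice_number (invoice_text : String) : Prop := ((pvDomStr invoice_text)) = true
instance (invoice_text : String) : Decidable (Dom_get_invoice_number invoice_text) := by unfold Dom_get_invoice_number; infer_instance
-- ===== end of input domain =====

-- B replaces A's nested split pipeline by a single character-level scan over the
-- unified delimiter set (comma, period or space); objective: alternative decomposition.

-- ===== PORT A =====
-- literal transliteration of A; invoice_item.lstrip('0') is ported by hand as
-- List.dropWhile (· == '0') (exact: lstrip with the single character '0').
def get_invoice_number (invoice_text : String) : List String :=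
  let invoice_text_list := PySem.Chars.splitOn invoice_text.toList [',']
  let invoice_str : List String := []
  if invoice_text_list = [] then invoice_str else
    invoice_text_list.foldl (fun invoice_str invoice_text_item =>
      let invoice_text_item := PySem.Chars.replace invoice_text_item ['.'] [' ']
      let invoice_list := PySem.Chars.splitOn (PySem.Chars.stripChars invoice_text_item [' ']) [' ']
      if invoice_list = [] then invoice_str else
        invoice_list.foldl (fun invoice_str invoice_item =>
          let invoice_item := invoice_item.dropWhile (· == '0')
          if invoice_item = [] then invoice_str else
            let invoice_str := invoice_str ++ [String.mk invoice_item]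
            if 2 < invoice_item.length then
              invoice_str ++ [String.mk (PySem.List.slice invoice_item none (some (-1)))]
            else invoice_str) invoice_str) invoice_str

-- ===== PORT B =====
-- literal transliteration of Source B: one fold over the characters (with the ',' sentinel
-- appended, as Source B does), state = (result so far, current token).
def get_invoice_number_alt (invoice_text : String) : List String :=
  let step := fun (st : List String × List Char) (ch : Char) =>
    if ch == ',' || ch == '.' || ch == ' ' then
      let t := st.2.dropWhile (· == '0')     -- ''.join(token).lstrip('0')
      if t = [] then (st.1, ([] : List Char)) else
        let result := st.1 ++ [String.mk t]
        let result := if 2 < t.length then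
          result ++ [String.mk (PySem.List.slice t none (some (-1)))] else result
        (result, ([] : List Char))
    else (st.1, st.2 ++ [ch])
  ((invoice_text.toList ++ [',']).foldl step ([], [])).1

-- ===== PRECONDITION & SPEC =====
def Spec_get_invoice_number (invoice_text : String) (out : List String) : Prop := out = get_invoice_number_alt invoice_text
instance (invoice_text : String) (out : List String) : Decidable (Spec_get_invoice_number invoice_text out) := by unfold Spec_get_invoice_number; infer_instance

-- ===== CLAIM (what is proved, stated in full; the proofs are below) =====
def Claim_equal_get_invoice_number : Prop := ∀ (invoice_text : String), Dom_get_invoice_number invoice_text → Spec_get_invoice_number invoice_text (get_invoice_number invoice_text)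

-- ===== LEMMAS AND PROOFS =====

/-- The pointwise substitution performed by `replace · ['.'] [' ']`. -/
def pvSubst (c : Char) : Char := if c == '.' then ' ' else c

/-- Tokens of a char list split on delimiter predicate `q`: (first piece, later pieces). -/
def pvTok (q : Char → Bool) : List Char → List Char × List (List Char)
  | [] => ([], [])
  | c :: t =>
      let r := pvTok q t
      if q c then ([], r.1 :: r.2) else (c :: r.1, r.2)

/-- All pieces, in order. -/
def pvPieces (q : Char → Bool) (l : List Char) : List (List Char) :=
  (pvTok q l).1 :: (pvTok q l).2

/-- What both programs emit for one raw token. -/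
def pvEmit (t : List Char) : List String :=
  let u := t.dropWhile (· == '0')
  if u = [] then []
  else if 2 < u.length then
    [String.mk u, String.mk (PySem.List.slice u none (some (-1)))]
  else [String.mk u]

/-- Flattened emission over all pieces. -/
def pvFE (q : Char → Bool) (l : List Char) : List String :=
  (pvPieces q l).flatMap pvEmit

theorem pvEmit_nil : pvEmit [] = [] := rfl

-- ---------- PySem pipeline pieces re-expressed through pvTok ----------

theorem pv_splitOn_go (c0 : Char) (l : List Char) : ∀ (fuel : Nat) (cur : List Char)
    (acc : List (List Char)), l.length < fuel →
    PySem.Chars.splitOn.go [c0] fuel l cur acc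
      = acc.reverse ++ (cur.reverse ++ (pvTok (· == c0) l).1) :: (pvTok (· == c0) l).2 := by
  induction l with
  | nil =>
    intro fuel cur acc h
    obtain ⟨f, rfl⟩ := Nat.exists_eq_succ_of_ne_zero (Nat.pos_iff_ne_zero.mp h)
    simp [PySem.Chars.splitOn.go, pvTok]
  | cons c rest ih =>
    intro fuel cur acc h
    match fuel, h with
    | f + 1, h =>
    by_cases hc : c0 = c
    · subst hc
      simp [PySem.Chars.splitOn.go, List.isPrefixOf, pvTok,
        ih f [] ((cur.reverse) :: acc) (by simp at h; omega)]
    · have hb : (c0 == c) = false := by simp [hc]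
      have hc2 : ¬ c = c0 := fun e => hc e.symm
      simp [PySem.Chars.splitOn.go, List.isPrefixOf, hb, hc2, pvTok,
        ih f (c :: cur) acc (by simp at h; omega)]

theorem pv_splitOn_single (c0 : Char) (l : List Char) :
    PySem.Chars.splitOn l [c0] = pvPieces (· == c0) l := by
  unfold PySem.Chars.splitOn pvPieces
  rw [pv_splitOn_go c0 l (l.length + 1) [] [] (Nat.lt_succ_self _)]
  simp

theorem pv_replace_go (l : List Char) : ∀ (fuel : Nat) (acc : List Char), l.length ≤ fuel →
    PySem.Chars.replace.go ['.'] [' '] fuel l acc = acc.reverse ++ l.map pvSubst := by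
  induction l with
  | nil =>
    intro fuel acc _
    cases fuel <;> simp [PySem.Chars.replace.go]
  | cons c rest ih =>
    intro fuel acc h
    match fuel, h with
    | f + 1, h =>
    by_cases hc : c = '.'
    · subst hc
      simp [PySem.Chars.replace.go, List.isPrefixOf, pvSubst,
        ih f (' ' :: acc) (by simp at h; omega)]
    · have hb : ('.' == c) = false := by simp [Ne.symm hc]
      have hb' : (c == '.') = false := by simp [hc]
      simp [PySem.Chars.replace.go, List.isPrefixOf, hb, pvSubst, hb',
        ih f (c :: acc) (by simp at h; omega)]

theorem pv_replace_dot (l : List Char) :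
    PySem.Chars.replace l ['.'] [' '] = l.map pvSubst := by
  unfold PySem.Chars.replace
  simp [pv_replace_go l l.length [] (le_refl _)]

theorem pv_stripChars_space (l : List Char) :
    PySem.Chars.stripChars l [' '] =
      List.rdropWhile (fun c => c == ' ') (l.dropWhile (fun c => c == ' ')) := by
  unfold PySem.Chars.stripChars List.rdropWhile
  have h : (fun c => List.contains [' '] c) = (fun c : Char => c == ' ') := by
    funext c
    by_cases hc : c = ' ' <;> simp [hc, Ne.symm]
  rw [h]

-- ---------- pvFE invariances ----------

theorem pvFE_dropWhile (q : Char → Bool) (l : List Char) :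
    pvFE q (l.dropWhile q) = pvFE q l := by
  induction l with
  | nil => rfl
  | cons c t ih =>
    by_cases h : q c
    · simpa [List.dropWhile_cons, h, pvFE, pvPieces, pvTok, pvEmit_nil] using ih
    · simp [List.dropWhile_cons, h]

theorem pvTok_append_q (q : Char → Bool) (c : Char) (hq : q c = true) (l : List Char) :
    pvTok q (l ++ [c]) = ((pvTok q l).1, (pvTok q l).2 ++ [[]]) := by
  induction l with
  | nil => simp [pvTok, hq]
  | cons a t ih =>
    by_cases h : q a <;> simp [pvTok, h, ih]

theorem pvTok_append_all_q (q : Char → Bool) :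
    ∀ (s l : List Char), (∀ c ∈ s, q c = true) →
    pvTok q (l ++ s) = ((pvTok q l).1, (pvTok q l).2 ++ s.map (fun _ => ([] : List Char))) := by
  intro s
  induction s with
  | nil => intro l _; simp
  | cons c s ih =>
    intro l h
    have h1 : l ++ c :: s = (l ++ [c]) ++ s := by simp
    rw [h1, ih (l ++ [c]) (fun x hx => h x (List.mem_cons_of_mem _ hx)),
      pvTok_append_q q c (h c List.mem_cons_self) l]
    simp

theorem pvFE_rdropWhile (q : Char → Bool) (l : List Char) :
    pvFE q (List.rdropWhile q l) = pvFE q l := by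
  conv_rhs => rw [← List.rdropWhile_append_rtakeWhile (p := q) (l := l)]
  rw [pvFE, pvFE, pvPieces, pvPieces,
    pvTok_append_all_q q (List.rtakeWhile q l) (List.rdropWhile q l)
      (fun c hc => List.mem_rtakeWhile_imp hc)]
  have hempty : ∀ s : List Char, ((s.map (fun _ => ([] : List Char))).flatMap pvEmit) = [] := by
    intro s; induction s with
    | nil => rfl
    | cons a t iht => simp [iht, pvEmit_nil]
  simp [List.flatMap_append, hempty]
  intro x _ _ hx
  rw [hx]
  rfl

-- ---------- splitting on a union of delimiters ----------

theorem pvPieces_or (p q : Char → Bool) (l : List Char) :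
    pvPieces (fun c => p c || q c) l = (pvPieces p l).flatMap (pvPieces q) := by
  induction l with
  | nil => simp [pvPieces, pvTok]
  | cons c t ih =>
    by_cases hp : p c
    · simp [pvPieces, pvTok, hp] at ih ⊢
      exact ih
    · by_cases hq : q c
      · simp [pvPieces, pvTok, hp, hq] at ih ⊢
        exact ih
      · simp [pvPieces, pvTok, hp, hq] at ih ⊢
        obtain ⟨h1, h2⟩ := ih
        exact ⟨by rw [h1], by rw [h2]⟩

-- ---------- the '.' → ' ' substitution commutes with tokenizing ----------

theorem pvTok_map_subst (l : List Char) :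
    pvTok (fun c => c == ' ') (l.map pvSubst)
      = ((pvTok (fun c => c == '.' || c == ' ') l).1.map pvSubst,
         (pvTok (fun c => c == '.' || c == ' ') l).2.map (List.map pvSubst)) := by
  induction l with
  | nil => simp [pvTok]
  | cons c t ih =>
    have hkey : (pvSubst c == ' ') = (c == '.' || c == ' ') := by
      by_cases h : c = '.' <;> simp [pvSubst, h]
    by_cases h : (c == '.' || c == ' ') = true
    · simp [pvTok, hkey, h, ih]
    · simp [pvTok, hkey, h, ih]

theorem pvTok_not_q (q : Char → Bool) (l : List Char) :
    (∀ c ∈ (pvTok q l).1, q c = false) ∧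
    (∀ p ∈ (pvTok q l).2, ∀ c ∈ p, q c = false) := by
  induction l with
  | nil => simp [pvTok]
  | cons a t ih =>
    by_cases h : q a
    · refine ⟨by simp [pvTok, h], ?_⟩
      intro p hp c hc
      simp [pvTok, h] at hp
      rcases hp with hp | hp
      · exact ih.1 c (hp ▸ hc)
      · exact ih.2 p hp c hc
    · refine ⟨?_, by simpa [pvTok, h] using ih.2⟩
      intro c hc
      simp [pvTok, h] at hc
      rcases hc with rfl | hc
      · simpa using h
      · exact ih.1 c hc

theorem pv_map_subst_id (p : List Char) (h : ∀ c ∈ p, (c == '.' || c == ' ') = false) :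
    p.map pvSubst = p := by
  have := List.map_congr_left (f := pvSubst) (g := id) (l := p)
    (fun c hc => by
      have := h c hc
      simp at this
      simp [pvSubst, this.1])
  simpa using this

-- ---------- one segment of A equals the '.'∪' ' tokenization ----------

theorem pv_segment (seg : List Char) :
    pvFE (fun c => c == ' ')
        (PySem.Chars.stripChars (PySem.Chars.replace seg ['.'] [' ']) [' '])
      = pvFE (fun c => c == '.' || c == ' ') seg := by
  rw [pv_replace_dot, pv_stripChars_space, pvFE_rdropWhile, pvFE_dropWhile]
  rw [pvFE, pvFE, pvPieces, pvPieces, pvTok_map_subst]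
  have h1 := (pvTok_not_q (fun c => c == '.' || c == ' ') seg).1
  have h2 := (pvTok_not_q (fun c => c == '.' || c == ' ') seg).2
  rw [pv_map_subst_id _ h1]
  have h3 : ((pvTok (fun c => c == '.' || c == ' ') seg).2.map (List.map pvSubst))
      = (pvTok (fun c => c == '.' || c == ' ') seg).2 := by
    have := List.map_congr_left (f := List.map pvSubst) (g := id)
      (l := (pvTok (fun c => c == '.' || c == ' ') seg).2)
      (fun p hp => by simpa using pv_map_subst_id p (h2 p hp))
    simpa using this
  rw [h3]

-- ---------- A as a flatMap over pieces ----------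

theorem pv_inner_fold (acc : List String) (il : List (List Char)) :
    il.foldl (fun invoice_str invoice_item =>
        let invoice_item := invoice_item.dropWhile (· == '0')
        if invoice_item = [] then invoice_str else
          let invoice_str := invoice_str ++ [String.mk invoice_item]
          if 2 < invoice_item.length then
            invoice_str ++ [String.mk (PySem.List.slice invoice_item none (some (-1)))]
          else invoice_str) acc
      = acc ++ il.flatMap pvEmit := by
  have hfun : (fun (invoice_str : List String) (invoice_item : List Char) =>
      let invoice_item := invoice_item.dropWhile (· == '0')
      if invoice_item = [] then invoice_str else
        let invoice_str := invoice_str ++ [String.mk invoice_item]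
        if 2 < invoice_item.length then
          invoice_str ++ [String.mk (PySem.List.slice invoice_item none (some (-1)))]
        else invoice_str) = (fun a t => a ++ pvEmit t) := by
    funext a t
    by_cases h0 : t.dropWhile (· == '0') = []
    · simp [pvEmit, h0]
    · simp only [pvEmit, h0, if_false, ite_not]
      split_ifs <;> simp [h0]
  rw [hfun, PySem.List.foldl_append_eq_flatMap]

theorem pvA_eq_FE (s : String) :
    get_invoice_number s
      = pvFE (fun c => (c == ',') || ((c == '.') || (c == ' '))) s.toList := by
  have houter : ∀ (acc : List String) (segs : List (List Char)),
      segs.foldl (fun invoice_str invoice_text_item =>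
        let invoice_text_item := PySem.Chars.replace invoice_text_item ['.'] [' ']
        let invoice_list := PySem.Chars.splitOn (PySem.Chars.stripChars invoice_text_item [' ']) [' ']
        if invoice_list = [] then invoice_str else
          invoice_list.foldl (fun invoice_str invoice_item =>
            let invoice_item := invoice_item.dropWhile (· == '0')
            if invoice_item = [] then invoice_str else
              let invoice_str := invoice_str ++ [String.mk invoice_item]
              if 2 < invoice_item.length then
                invoice_str ++ [String.mk (PySem.List.slice invoice_item none (some (-1)))]
              else invoice_str) invoice_str) acc
        = acc ++ segs.flatMap (fun seg => pvFE (fun c => c == '.' || c == ' ') seg) := by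
    intro acc segs
    have hfun : (fun (invoice_str : List String) (invoice_text_item : List Char) =>
        let invoice_text_item := PySem.Chars.replace invoice_text_item ['.'] [' ']
        let invoice_list := PySem.Chars.splitOn (PySem.Chars.stripChars invoice_text_item [' ']) [' ']
        if invoice_list = [] then invoice_str else
          invoice_list.foldl (fun invoice_str invoice_item =>
            let invoice_item := invoice_item.dropWhile (· == '0')
            if invoice_item = [] then invoice_str else
              let invoice_str := invoice_str ++ [String.mk invoice_item]
              if 2 < invoice_item.length then
                invoice_str ++ [String.mk (PySem.List.slice invoice_item none (some (-1)))]
              else invoice_str) invoice_str)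
        = (fun a seg => a ++ pvFE (fun c => c == '.' || c == ' ') seg) := by
      funext a seg
      show (let invoice_list := PySem.Chars.splitOn
              (PySem.Chars.stripChars (PySem.Chars.replace seg ['.'] [' ']) [' ']) [' ']
            if invoice_list = [] then a else
              invoice_list.foldl _ a) = _
      rw [show PySem.Chars.splitOn
            (PySem.Chars.stripChars (PySem.Chars.replace seg ['.'] [' ']) [' ']) [' ']
          = pvPieces (· == ' ')
              (PySem.Chars.stripChars (PySem.Chars.replace seg ['.'] [' ']) [' ']) from
        pv_splitOn_single ' ' _]
      rw [if_neg (by simp [pvPieces])]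
      rw [pv_inner_fold]
      rw [show (pvPieces (· == ' ')
            (PySem.Chars.stripChars (PySem.Chars.replace seg ['.'] [' ']) [' '])).flatMap pvEmit
          = pvFE (fun c => c == ' ')
              (PySem.Chars.stripChars (PySem.Chars.replace seg ['.'] [' ']) [' ']) from rfl]
      rw [pv_segment]
    rw [hfun, PySem.List.foldl_append_eq_flatMap]
  unfold get_invoice_number
  rw [pv_splitOn_single]
  rw [if_neg (by simp [pvPieces])]
  rw [houter]
  rw [show (fun seg => pvFE (fun c => c == '.' || c == ' ') seg)
      = (fun seg => (pvPieces (fun c => c == '.' || c == ' ') seg).flatMap pvEmit) from rfl]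
  rw [← List.flatMap_assoc, ← pvPieces_or]
  rfl

-- ---------- B as a flatMap over pieces ----------

/-- Source B's loop body (the port's `step`), as a named helper for the proofs. -/
def pvStep (st : List String × List Char) (ch : Char) : List String × List Char :=
  if ch == ',' || ch == '.' || ch == ' ' then
    let t := st.2.dropWhile (· == '0')
    if t = [] then (st.1, ([] : List Char)) else
      let result := st.1 ++ [String.mk t]
      let result := if 2 < t.length then
        result ++ [String.mk (PySem.List.slice t none (some (-1)))] else result
      (result, ([] : List Char))
  else (st.1, st.2 ++ [ch])

theorem pvStep_delim (st : List String × List Char) (ch : Char)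
    (h : (ch == ',' || ch == '.' || ch == ' ') = true) :
    pvStep st ch = (st.1 ++ pvEmit st.2, []) := by
  by_cases h0 : st.2.dropWhile (· == '0') = []
  · simp [pvStep, h, pvEmit, h0]
  · simp only [pvStep, pvEmit, h, h0, if_true, if_false, ite_not]
    split_ifs <;> simp [h0]

theorem pvB_fold (cs : List Char) : ∀ (out : List String) (buf : List Char),
    ((cs ++ [',']).foldl pvStep (out, buf)).1
      = out ++ pvEmit (buf ++ (pvTok (fun c => c == ',' || c == '.' || c == ' ') cs).1)
          ++ ((pvTok (fun c => c == ',' || c == '.' || c == ' ') cs).2).flatMap pvEmit := by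
  induction cs with
  | nil =>
    intro out buf
    simp [pvStep_delim (out, buf) ',' (by decide), pvTok]
  | cons c cs ih =>
    intro out buf
    by_cases h : (c == ',' || c == '.' || c == ' ') = true
    · simp only [List.cons_append, List.foldl_cons, pvStep_delim (out, buf) c h]
      rw [ih]
      simp [pvTok, h]
    · simp only [List.cons_append, List.foldl_cons]
      have hstep : pvStep (out, buf) c = (out, buf ++ [c]) := by
        simp [pvStep, h]
      rw [hstep, ih]
      simp [pvTok, h]

theorem pvB_eq_FE (s : String) :
    get_invoice_number_alt s
      = pvFE (fun c => c == ',' || c == '.' || c == ' ') s.toList := by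
  show ((s.toList ++ [',']).foldl pvStep ([], [])).1 = _
  rw [pvB_fold s.toList [] []]
  simp [pvFE, pvPieces]

-- ===== VERDICT (by name: the statement is the Claim_ definition above) =====
theorem get_invoice_number_spec : Claim_equal_get_invoice_number := by
  intro s _
  show get_invoice_number s = get_invoice_number_alt s
  rw [pvA_eq_FE, pvB_eq_FE]
  have h : (fun c : Char => (c == ',') || ((c == '.') || (c == ' ')))
      = (fun c : Char => c == ',' || c == '.' || c == ' ') := by
    funext c; rw [Bool.or_assoc]
  rw [h]
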